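-- pv_equiv track=rewrite | github.com/capan/JiraWebReport | jira_db_logger.py | turkifyList
-- ===== SOURCE A (Python) =====
-- def turkifyList(theList):
--     for x in range(0, len(theList)):
--         for x in range(0, len(theList)):
--             if u'Resolved' == theList[x][0]:
--                 theList[x] = tuple(
--                     [u'Çözüldü', theList[x][1]])
--             elif u'Closed' == theList[x][0]:
--                 theList[x] = tuple(
--                     [u'Kapandı', theList[x][1]])
--             elif u'Waiting for support' == theList[x][0]:
--                 theList[x] = tuple(
--                     [u'Destek Bekleniyor', theList[x][1]])
--             elif u'Waiting for customer' == theList[x][0]: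
--                 theList[x] = tuple(
--                     [u'Müşteriden Yanıt Bekleniyor', theList[x][1]])
--             elif u'On Hold' == theList[x][0]:
--                 theList[x] = tuple(
--                     [u'Beklemede', theList[x][1]])
--     return theList
-- ===== SOURCE B (Python) =====
-- _TR = {
--     u'Resolved': u'Çözüldü',
--     u'Closed': u'Kapandı',
--     u'Waiting for support': u'Destek Bekleniyor',
--     u'Waiting for customer': u'Müşteriden Yanıt Bekleniyor',
--     u'On Hold': u'Beklemede',
-- }
--
-- def turkifyList(theList):
--     for i, (status, count) in enumerate(theList):
--         if status in _TR:
--             theList[i] = (_TR[status], count)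
--     return theList
-- ===== Notes on version B (the rewrite author's own statement) =====
-- stated objective: faster
-- what changed: Replaces the redundant quadratic nested index loops and five-way elif chain with a single in-place enumerate pass over a status-to-Turkish lookup dict.
import Mathlib
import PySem

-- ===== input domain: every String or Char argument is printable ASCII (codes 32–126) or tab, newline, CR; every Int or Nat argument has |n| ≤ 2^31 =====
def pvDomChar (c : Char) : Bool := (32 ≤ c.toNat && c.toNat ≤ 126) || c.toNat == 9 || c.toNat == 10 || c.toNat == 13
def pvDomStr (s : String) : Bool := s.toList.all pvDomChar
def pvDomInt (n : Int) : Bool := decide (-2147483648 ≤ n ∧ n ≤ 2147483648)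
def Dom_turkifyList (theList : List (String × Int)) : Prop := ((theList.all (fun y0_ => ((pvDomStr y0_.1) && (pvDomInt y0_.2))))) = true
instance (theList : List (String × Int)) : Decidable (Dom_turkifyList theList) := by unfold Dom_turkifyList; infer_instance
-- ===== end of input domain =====

-- B replaces A's redundant quadratic nested loops and five-way elif chain by a single
-- in-place pass over a translation dict (same return value; both mutate the list in Python).


-- ===== PORT A =====
-- body of A's inner loop: the five-way elif chain, reading and writing theList[x]
def stepA (l : List (String × Int)) (x : Int) : List (String × Int) :=
  if (PySem.List.pyGetD l x ("", 0)).1 = "Resolved" then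
    PySem.List.pySetD l x ("Çözüldü", (PySem.List.pyGetD l x ("", 0)).2)
  else if (PySem.List.pyGetD l x ("", 0)).1 = "Closed" then
    PySem.List.pySetD l x ("Kapandı", (PySem.List.pyGetD l x ("", 0)).2)
  else if (PySem.List.pyGetD l x ("", 0)).1 = "Waiting for support" then
    PySem.List.pySetD l x ("Destek Bekleniyor", (PySem.List.pyGetD l x ("", 0)).2)
  else if (PySem.List.pyGetD l x ("", 0)).1 = "Waiting for customer" then
    PySem.List.pySetD l x ("Müşteriden Yanıt Bekleniyor", (PySem.List.pyGetD l x ("", 0)).2)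
  else if (PySem.List.pyGetD l x ("", 0)).1 = "On Hold" then
    PySem.List.pySetD l x ("Beklemede", (PySem.List.pyGetD l x ("", 0)).2)
  else l

def turkifyList (theList : List (String × Int)) : List (String × Int) :=
  (PySem.List.pyRange 0 (theList.length : Int) 1).foldl
    (fun l _x => (PySem.List.pyRange 0 (l.length : Int) 1).foldl stepA l) theList

-- ===== PORT B =====
def trDict : PySem.Dict String String :=
  PySem.Dict.ofList
  [("Resolved", "Çözüldü"), ("Closed", "Kapandı"),
   ("Waiting for support", "Destek Bekleniyor"),
   ("Waiting for customer", "Müşteriden Yanıt Bekleniyor"),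
   ("On Hold", "Beklemede")]

-- body of B's single loop: 'if status in _TR: theList[i] = (_TR[status], count)'
def stepB (l : List (String × Int)) (p : Int × (String × Int)) : List (String × Int) :=
  match PySem.Dict.get? trDict p.2.1 with
  | some t => PySem.List.pySetD l p.1 (t, p.2.2)
  | none => l

def turkifyList_alt (theList : List (String × Int)) : List (String × Int) :=
  (PySem.List.enumerate theList 0).foldl stepB theList

-- ===== PRECONDITION & SPEC =====
def Spec_turkifyList (theList : List (String × Int)) (out : List (String × Int)) : Prop := out = turkifyList_alt theList
instance (theList : List (String × Int)) (out : List (String × Int)) : Decidable (Spec_turkifyList theList out) := by unfold Spec_turkifyList; infer_instance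

-- ===== CLAIM (what is proved, stated in full; the proofs are below) =====
def Claim_equal_turkifyList : Prop := ∀ (theList : List (String × Int)), Dom_turkifyList theList → Spec_turkifyList theList (turkifyList theList)

-- ===== LEMMAS AND PROOFS =====

-- the translation both programs implement, element-wise
def tr (e : String × Int) : String × Int :=
  match PySem.Dict.get? trDict e.1 with
  | some t => (t, e.2)
  | none => e

lemma get?_trDict_none (s : String)
    (h1 : s ≠ "Resolved") (h2 : s ≠ "Closed") (h3 : s ≠ "Waiting for support")
    (h4 : s ≠ "Waiting for customer") (h5 : s ≠ "On Hold") :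
    PySem.Dict.get? trDict s = none := by
  have hit : trDict.items =
      [("Resolved", "Çözüldü"), ("Closed", "Kapandı"),
       ("Waiting for support", "Destek Bekleniyor"),
       ("Waiting for customer", "Müşteriden Yanıt Bekleniyor"),
       ("On Hold", "Beklemede")] := rfl
  have hfind : List.find? (fun p => p.1 == s) trDict.items = none := by
    rw [hit]
    apply List.find?_eq_none.mpr
    intro p hp
    fin_cases hp <;> simp only [beq_iff_eq] <;>
      exact fun h => by first
        | exact h1 h.symm | exact h2 h.symm | exact h3 h.symm
        | exact h4 h.symm | exact h5 h.symm
  simp [PySem.Dict.get?, hfind]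

lemma tr_of_none (s : String) (k : Int)
    (h1 : s ≠ "Resolved") (h2 : s ≠ "Closed") (h3 : s ≠ "Waiting for support")
    (h4 : s ≠ "Waiting for customer") (h5 : s ≠ "On Hold") :
    tr (s, k) = (s, k) := by
  unfold tr
  rw [get?_trDict_none s h1 h2 h3 h4 h5]

lemma chain_eq_tr (s : String) (k : Int) :
    (if s = "Resolved" then (("Çözüldü" : String), k)
     else if s = "Closed" then ("Kapandı", k)
     else if s = "Waiting for support" then ("Destek Bekleniyor", k)
     else if s = "Waiting for customer" then ("Müşteriden Yanıt Bekleniyor", k)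
     else if s = "On Hold" then ("Beklemede", k)
     else (s, k)) = tr (s, k) := by
  split_ifs with h1 h2 h3 h4 h5 <;> subst_vars <;>
    first
    | rfl
    | exact (tr_of_none s k h1 h2 h3 h4 h5).symm

lemma tr_idem (e : String × Int) : tr (tr e) = tr e := by
  obtain ⟨s, k⟩ := e
  rw [← chain_eq_tr s k]
  split_ifs with h1 h2 h3 h4 h5 <;>
    first
    | rfl
    | exact tr_of_none s k h1 h2 h3 h4 h5

lemma set_at_len (pre : List (String × Int)) (e v : String × Int) (rest : List (String × Int)) :
    (pre ++ e :: rest).set pre.length v = pre ++ v :: rest := by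
  induction pre with
  | nil => rfl
  | cons h t ih => simp [ih]

lemma stepA_at (l : List (String × Int)) (a : Nat) (h : a < l.length) :
    stepA l (a : Int) = l.set a (tr l[a]) := by
  have hg : PySem.List.pyGetD l (a : Int) ("", 0) = l[a] := by
    rw [PySem.List.pyGetD_natCast, List.getD_eq_getElem l ("", 0) h]
  unfold stepA
  rw [hg]
  rcases he : l[a] with ⟨s, k⟩
  simp only [PySem.List.pySetD_natCast]
  rw [show (l.set a (tr (s, k)) = if s = "Resolved" then l.set a ("Çözüldü", k)
      else if s = "Closed" then l.set a ("Kapandı", k)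
      else if s = "Waiting for support" then l.set a ("Destek Bekleniyor", k)
      else if s = "Waiting for customer" then l.set a ("Müşteriden Yanıt Bekleniyor", k)
      else if s = "On Hold" then l.set a ("Beklemede", k)
      else l.set a (s, k)) from by rw [← chain_eq_tr s k]; split_ifs <;> rfl]
  split_ifs <;> try rfl
  rw [← he, List.set_getElem_self]

lemma inner_from : ∀ (d : Nat) (l : List (String × Int)) (a : Nat), l.length - a = d →
    (PySem.List.pyRange (a : Int) (l.length : Int) 1).foldl stepA l
      = l.take a ++ (l.drop a).map tr := by
  intro d
  induction d with
  | zero =>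
    intro l a hd
    have hle : l.length ≤ a := by omega
    rw [PySem.List.pyRange_one_eq_nil (by exact_mod_cast hle)]
    simp [List.take_of_length_le hle, List.drop_of_length_le hle]
  | succ d ih =>
    intro l a hd
    have hlt : a < l.length := by omega
    rw [PySem.List.pyRange_one_cons (by exact_mod_cast hlt)]
    simp only [List.foldl_cons]
    rw [stepA_at l a hlt]
    have hlen : (l.set a (tr l[a])).length = l.length := by simp
    have hcast : ((a : Int) + 1) = ((a + 1 : Nat) : Int) := by push_cast; ring
    rw [hcast, show (l.length : Int) = ((l.set a (tr l[a])).length : Int) by rw [hlen]]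
    rw [ih (l.set a (tr l[a])) (a + 1) (by rw [hlen]; omega)]
    rw [List.drop_set_of_lt (by omega : a < a + 1)]
    have htake : (l.set a (tr l[a])).take (a + 1) = l.take a ++ [tr l[a]] := by
      rw [List.take_add_one, List.take_set_of_le (by omega : a ≤ a)]
      simp [List.getElem?_set_self' , List.getElem?_eq_getElem hlt]
    rw [htake, List.drop_eq_getElem_cons hlt]
    simp
    rw [List.drop_eq_getElem_cons (show a < (List.map tr l).length by simpa using hlt)]
    simp

lemma F_eq (l : List (String × Int)) :
    (PySem.List.pyRange 0 (l.length : Int) 1).foldl stepA l = l.map tr := by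
  have := inner_from (l.length) l 0 (by omega)
  simpa using this

lemma outer_const (r : List Int) (m : List (String × Int))
    (h : (PySem.List.pyRange 0 (m.length : Int) 1).foldl stepA m = m) :
    r.foldl (fun acc _ => (PySem.List.pyRange 0 (acc.length : Int) 1).foldl stepA acc) m = m := by
  induction r with
  | nil => rfl
  | cons x xs ih => simpa [h] using ih

lemma A_eq_map (l : List (String × Int)) : turkifyList l = l.map tr := by
  unfold turkifyList
  rcases l with _ | ⟨e, rest⟩
  · rfl
  · set l := e :: rest with hl
    have hpos : (0 : Int) < (l.length : Int) := by simp [hl]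
    rw [PySem.List.pyRange_one_cons hpos]
    simp only [List.foldl_cons]
    rw [F_eq l]
    apply outer_const
    have hlen : (l.map tr).length = l.length := by simp
    rw [show ((l.map tr).length : Int) = (l.length : Int) by rw [hlen]]
    have := F_eq (l.map tr)
    rw [show ((l.map tr).length : Int) = (l.length : Int) by rw [hlen]] at this
    rw [this, List.map_map]
    exact List.map_congr_left (fun e _ => tr_idem e)

lemma alt_from : ∀ (orig pre : List (String × Int)),
    (PySem.List.enumerate orig (pre.length : Int)).foldl stepB (pre ++ orig)
      = pre ++ orig.map tr := by
  intro orig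
  induction orig with
  | nil => simp [PySem.List.enumerate]
  | cons e rest ih =>
    intro pre
    rw [PySem.List.enumerate_cons]
    simp only [List.foldl_cons]
    have hstep : stepB (pre ++ e :: rest) ((pre.length : Int), e)
        = (pre ++ [tr e]) ++ rest := by
      unfold stepB tr
      rcases hg : PySem.Dict.get? trDict e.1 with _ | t
      · simp
      · simp only [PySem.List.pySetD_natCast]
        rw [set_at_len]
        simp
    rw [hstep]
    have hc : ((pre.length : Int) + 1) = (((pre ++ [tr e]).length : Nat) : Int) := by
      simp
    rw [hc, ih (pre ++ [tr e])]
    simp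

lemma B_eq_map (l : List (String × Int)) : turkifyList_alt l = l.map tr := by
  have := alt_from l []
  simpa [turkifyList_alt] using this

-- ===== VERDICT (by name: the statement is the Claim_ definition above) =====
theorem turkifyList_spec : Claim_equal_turkifyList := by
  intro l _
  unfold Spec_turkifyList
  rw [A_eq_map, B_eq_map]
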